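-- pv_equiv track=rewrite | github.com/HuyaneMatsu/scarletio | scarletio/utils/trace/expression_parsing/parsing.py | _parse_forward_next_string
-- ===== SOURCE A (Python) =====
-- ACTION_TYPE_NONE = 0
--
-- ACTION_TYPE_STRING_OPEN_SINGLE_QUOTE = 7
--
-- ACTION_TYPE_STRING_OPEN_DOUBLE_QUOTE = 8
--
-- ACTION_TYPE_STRING_OPEN_TRIPLE_SINGLE_QUOTE = 9
--
-- ACTION_TYPE_STRING_OPEN_TRIPLE_DOUBLE_QUOTE = 10
--
-- ACTION_TYPE_STRING_CLOSE_SINGLE_QUOTE = 11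
--
-- ACTION_TYPE_STRING_CLOSE_DOUBLE_QUOTE = 12
--
-- ACTION_TYPE_STRING_CLOSE_TRIPLE_SINGLE_QUOTE = 13
--
-- ACTION_TYPE_STRING_CLOSE_TRIPLE_DOUBLE_QUOTE = 14
--
-- def _parse_forward_next_string(line, index, length, source_action):
--     """
--     Parses till the string is ended.
--
--     Parameters
--     ----------
--     line : `str`
--         The line to parse from.
--     index : `int`
--         The index to start parsing at.
--     length : `int`
--         Index to parse till.
--
--     Returns
--     -------
--     index : `int`
--     action : `int`
--     """
--     if source_action == ACTION_TYPE_STRING_OPEN_SINGLE_QUOTE: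
--         end_character = '\''
--         triple_quited = False
--         closer_action = ACTION_TYPE_STRING_CLOSE_SINGLE_QUOTE
--     elif source_action == ACTION_TYPE_STRING_OPEN_DOUBLE_QUOTE:
--         end_character = '"'
--         triple_quited = False
--         closer_action = ACTION_TYPE_STRING_CLOSE_DOUBLE_QUOTE
--     elif source_action == ACTION_TYPE_STRING_OPEN_TRIPLE_SINGLE_QUOTE:
--         end_character = '\''
--         triple_quited = True
--         closer_action = ACTION_TYPE_STRING_CLOSE_TRIPLE_SINGLE_QUOTE
--     elif source_action == ACTION_TYPE_STRING_OPEN_TRIPLE_DOUBLE_QUOTE: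
--         end_character = '"'
--         triple_quited = True
--         closer_action = ACTION_TYPE_STRING_CLOSE_TRIPLE_DOUBLE_QUOTE
--     else:
--         end_character = '\''
--         triple_quited = False
--         closer_action = ACTION_TYPE_STRING_CLOSE_SINGLE_QUOTE
--
--
--     while True:
--         if index >= length:
--             action = ACTION_TYPE_NONE
--             break
--
--         character = line[index]
--         if character == '\\':
--             index += 2
--             continue
--
--         if character == end_character:
--             if triple_quited:
--                 if (
--                     (index + 2 < length) and
--                     (line[index + 1] == end_character) and
--                     (line[index + 2] == end_character)
--                 ):
--                     index += 2
--                 else: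
--                     index += 1
--                     continue
--
--             index += 1
--             action = closer_action
--             break
--
--         index += 1
--         continue
--
--     return index, action
-- ===== SOURCE B (Python) =====
-- ACTION_TYPE_NONE = 0
-- ACTION_TYPE_STRING_OPEN_SINGLE_QUOTE = 7
-- ACTION_TYPE_STRING_OPEN_DOUBLE_QUOTE = 8
-- ACTION_TYPE_STRING_OPEN_TRIPLE_SINGLE_QUOTE = 9
-- ACTION_TYPE_STRING_OPEN_TRIPLE_DOUBLE_QUOTE = 10
-- ACTION_TYPE_STRING_CLOSE_SINGLE_QUOTE = 11
-- ACTION_TYPE_STRING_CLOSE_DOUBLE_QUOTE = 12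
-- ACTION_TYPE_STRING_CLOSE_TRIPLE_SINGLE_QUOTE = 13
-- ACTION_TYPE_STRING_CLOSE_TRIPLE_DOUBLE_QUOTE = 14
--
--
-- def _parse_forward_next_string(line, index, length, source_action):
--     """Scan forward with str.find jumps instead of a per-character loop."""
--     if source_action == ACTION_TYPE_STRING_OPEN_DOUBLE_QUOTE:
--         end_character = '"'
--         triple_quited = False
--         closer_action = ACTION_TYPE_STRING_CLOSE_DOUBLE_QUOTE
--     elif source_action == ACTION_TYPE_STRING_OPEN_TRIPLE_SINGLE_QUOTE:
--         end_character = '\''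
--         triple_quited = True
--         closer_action = ACTION_TYPE_STRING_CLOSE_TRIPLE_SINGLE_QUOTE
--     elif source_action == ACTION_TYPE_STRING_OPEN_TRIPLE_DOUBLE_QUOTE:
--         end_character = '"'
--         triple_quited = True
--         closer_action = ACTION_TYPE_STRING_CLOSE_TRIPLE_DOUBLE_QUOTE
--     else:
--         # single-quote open and the default fall-back behave identically
--         end_character = '\''
--         triple_quited = False
--         closer_action = ACTION_TYPE_STRING_CLOSE_SINGLE_QUOTE
--
--     while True:
--         if index >= length:
--             return index, ACTION_TYPE_NONE
--
--         quote_at = line.find(end_character, index)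
--         escape_at = line.find('\\', index)
--
--         # a hit at or beyond `length` is out of the parsed region
--         if escape_at != -1 and escape_at < length and (quote_at == -1 or quote_at >= length or escape_at < quote_at):
--             # escape sequence: skip the escaped character as well
--             index = escape_at + 2
--             continue
--
--         if quote_at == -1 or quote_at >= length:
--             # nothing significant left in the region
--             return length, ACTION_TYPE_NONE
--
--         if triple_quited:
--             if (
--                 (quote_at + 2 < length) and
--                 (line[quote_at + 1] == end_character) and
--                 (line[quote_at + 2] == end_character)
--             ):
--                 return quote_at + 3, closer_action
--
--             # a lone quote inside a triple quoted string
--             index = quote_at + 1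
--             continue
--
--         return quote_at + 1, closer_action
-- ===== Notes on version B (the rewrite author's own statement) =====
-- stated objective: idiomatic
-- what changed: A's per-character while loop is replaced by jumps with line.find(end_character, index) and line.find('\\', index) to the next significant position (quote or escape), so insignificant characters are skipped by the C-level str.find instead of being visited one by one.
-- outside the precondition, e.g. on _parse_forward_next_string("ab'", -3, 3, 7): A returns (0, 11), B returns (3, 11); on _parse_forward_next_string("'x", 0, 9, 7): A returns (1, 11), B returns (1, 11)
import Mathlib
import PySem

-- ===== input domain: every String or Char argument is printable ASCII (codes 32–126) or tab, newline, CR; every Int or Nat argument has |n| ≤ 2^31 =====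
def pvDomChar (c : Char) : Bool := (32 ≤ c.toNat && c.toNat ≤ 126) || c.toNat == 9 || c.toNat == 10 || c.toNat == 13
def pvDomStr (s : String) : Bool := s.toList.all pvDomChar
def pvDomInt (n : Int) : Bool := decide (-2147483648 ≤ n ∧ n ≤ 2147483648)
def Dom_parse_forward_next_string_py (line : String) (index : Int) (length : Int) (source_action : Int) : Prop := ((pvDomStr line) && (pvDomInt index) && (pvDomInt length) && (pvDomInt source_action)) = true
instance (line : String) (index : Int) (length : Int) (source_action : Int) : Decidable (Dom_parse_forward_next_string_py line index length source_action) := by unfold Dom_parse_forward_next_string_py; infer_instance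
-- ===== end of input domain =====

-- B replaces A's per-character scanning loop by str.find jumps to the next quote/backslash; return values are identical on Pre_.

-- termination helper for the B-side loop (cited in its decreasing_by): str.find(sub, start) is -1 or ≥ start
theorem pvFindFrom_ge (s sub : List Char) (st : Int) :
    PySem.Chars.findFrom s sub st none = -1 ∨
      (st ≤ PySem.Chars.findFrom s sub st none ∧ 0 ≤ PySem.Chars.findFrom s sub st none) := by
  unfold PySem.Chars.findFrom
  simp only []
  generalize hst : (if st < 0 then if st + (s.length : Int) < 0 then 0 else st + (s.length : Int) else st) = st'
  have hb : st ≤ st' ∧ 0 ≤ st' := by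
    rw [← hst]; constructor <;> (split_ifs <;> omega)
  split_ifs with h1 h2
  · left; rfl
  · left; rfl
  · right
    have := PySem.Chars.neg_one_le_find (List.drop st'.toNat (List.take ((s.length : Int)).toNat s)) sub
    omega

-- ===== PORT A =====
-- A's while loop: character-by-character scan.  line[index] is PySem.Chars.pyGet?; Python raises
-- IndexError where it is none (those inputs are outside Pre_), so the .getD default is never read there.
def pvALoop (cs : List Char) (endc : Char) (triple : Bool) (closer : Int) (length : Int) (index : Int) : Int × Int :=
  if _h : length ≤ index then (index, 0)
  else
    if (PySem.Chars.pyGet? cs index).getD (Char.ofNat 0) = '\\' then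
      pvALoop cs endc triple closer length (index + 2)
    else if (PySem.Chars.pyGet? cs index).getD (Char.ofNat 0) = endc then
      if triple then
        if index + 2 < length ∧ (PySem.Chars.pyGet? cs (index + 1)).getD (Char.ofNat 0) = endc ∧
            (PySem.Chars.pyGet? cs (index + 2)).getD (Char.ofNat 0) = endc then
          (index + 2 + 1, closer)
        else pvALoop cs endc triple closer length (index + 1)
      else (index + 1, closer)
    else pvALoop cs endc triple closer length (index + 1)
  termination_by (length - index).toNat
  decreasing_by all_goals omega

def parse_forward_next_string_py (line : String) (index : Int) (length : Int) (source_action : Int) : Int × Int :=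
  if source_action = 7 then pvALoop line.toList '\'' false 11 length index
  else if source_action = 8 then pvALoop line.toList '"' false 12 length index
  else if source_action = 9 then pvALoop line.toList '\'' true 13 length index
  else if source_action = 10 then pvALoop line.toList '"' true 14 length index
  else pvALoop line.toList '\'' false 11 length index

-- ===== PORT B =====
-- B's while loop: jump with line.find(end_character, index) / line.find('\\', index) (= PySem.Chars.findFrom);
-- a hit at or beyond `length` counts as not found.
def pvBLoop (cs : List Char) (endc : Char) (triple : Bool) (closer : Int) (length : Int) (index : Int) : Int × Int :=
  if _h : length ≤ index then (index, 0)
  else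
    if he : ¬(PySem.Chars.findFrom cs ['\\'] index none = -1 ∨ length ≤ PySem.Chars.findFrom cs ['\\'] index none) ∧
        (PySem.Chars.findFrom cs [endc] index none = -1 ∨ length ≤ PySem.Chars.findFrom cs [endc] index none ∨
          PySem.Chars.findFrom cs ['\\'] index none < PySem.Chars.findFrom cs [endc] index none) then
      pvBLoop cs endc triple closer length (PySem.Chars.findFrom cs ['\\'] index none + 2)
    else if hq : PySem.Chars.findFrom cs [endc] index none = -1 ∨ length ≤ PySem.Chars.findFrom cs [endc] index none then
      (length, 0)
    else if triple then
      if PySem.Chars.findFrom cs [endc] index none + 2 < length ∧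
          (PySem.Chars.pyGet? cs (PySem.Chars.findFrom cs [endc] index none + 1)).getD (Char.ofNat 0) = endc ∧
          (PySem.Chars.pyGet? cs (PySem.Chars.findFrom cs [endc] index none + 2)).getD (Char.ofNat 0) = endc then
        (PySem.Chars.findFrom cs [endc] index none + 3, closer)
      else pvBLoop cs endc triple closer length (PySem.Chars.findFrom cs [endc] index none + 1)
    else (PySem.Chars.findFrom cs [endc] index none + 1, closer)
  termination_by (length - index).toNat
  decreasing_by
  · rcases pvFindFrom_ge cs ['\\'] index with h | h <;> omega
  · rcases pvFindFrom_ge cs [endc] index with h | h <;> omega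

def parse_forward_next_string_py_alt (line : String) (index : Int) (length : Int) (source_action : Int) : Int × Int :=
  if source_action = 8 then pvBLoop line.toList '"' false 12 length index
  else if source_action = 9 then pvBLoop line.toList '\'' true 13 length index
  else if source_action = 10 then pvBLoop line.toList '"' true 14 length index
  else pvBLoop line.toList '\'' false 11 length index

-- ===== PRECONDITION & SPEC =====
-- Pre_ excludes calls whose scan starts at a negative index (A then reads characters through Python's
-- negative-index wraparound, an accident of the implementation that no caller relies on) and calls with
-- length > len(line) (A can then raise IndexError by scanning past the end of the string).
def Pre_parse_forward_next_string_py (line : String) (index : Int) (length : Int) (_source_action : Int) : Prop :=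
  length ≤ index ∨ (0 ≤ index ∧ length ≤ PySem.Str.len line)
instance (line : String) (index : Int) (length : Int) (source_action : Int) : Decidable (Pre_parse_forward_next_string_py line index length source_action) := by unfold Pre_parse_forward_next_string_py; infer_instance

def pvWitness_parse_forward_next_string_py : String × Int × Int × Int := ("a\\'b'", 0, 5, 7)

def Spec_parse_forward_next_string_py (line : String) (index : Int) (length : Int) (source_action : Int) (out : Int × Int) : Prop := out = parse_forward_next_string_py_alt line index length source_action
instance (line : String) (index : Int) (length : Int) (source_action : Int) (out : Int × Int) : Decidable (Spec_parse_forward_next_string_py line index length source_action out) := by unfold Spec_parse_forward_next_string_py; infer_instance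

-- ===== CLAIM (what is proved, stated in full; the proofs are below) =====
def Claim_equal_parse_forward_next_string_py : Prop := ∀ (line : String) (index : Int) (length : Int) (source_action : Int), Dom_parse_forward_next_string_py line index length source_action → Pre_parse_forward_next_string_py line index length source_action → Spec_parse_forward_next_string_py line index length source_action (parse_forward_next_string_py line index length source_action)

-- ===== LEMMAS AND PROOFS =====

theorem pvPrefixDrop (c : Char) (l : List Char) (i : Nat) : [c] <+: l.drop i ↔ l[i]? = some c := by
  rw [← List.head?_drop]
  constructor
  · rintro ⟨t, ht⟩; rw [← ht]; rfl
  · intro h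
    cases hd : l.drop i with
    | nil => rw [hd] at h; simp at h
    | cons x t => rw [hd] at h; simp at h; subst h; exact ⟨t, by simp⟩

theorem pvMemDrop (cs : List Char) (c : Char) (j m : Nat) (hjm : j ≤ m) (h : cs[m]? = some c) :
    [c] <:+: cs.drop j := by
  rw [List.singleton_infix_iff]
  have h2 : (cs.drop j)[m - j]? = some c := by
    simp only [List.getElem?_drop]
    rwa [Nat.add_sub_cancel' hjm]
  exact List.mem_of_getElem? h2

theorem pvGetNat (cs : List Char) (k : Nat) (hk : k < cs.length) :
    PySem.Chars.pyGet? cs (k : Int) = cs[k]? := by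
  simp [PySem.Chars.pyGet?, hk]

theorem pvF2 (cs : List Char) (c : Char) (k : Nat) (hk : k < cs.length) (hc : cs[k]? = some c) :
    PySem.Chars.findFrom cs [c] (k : Int) none = (k : Int) := by
  have hkle : k ≤ cs.length := le_of_lt hk
  have hocc : [c] <+: cs.drop k := (pvPrefixDrop c cs k).2 hc
  have hne : PySem.Chars.findFrom cs [c] (k : Int) none ≠ -1 := by
    intro h
    rw [PySem.Chars.findFrom_natCast_eq_neg_one_iff cs [c] k hkle] at h
    exact h hocc.isInfix
  obtain ⟨hge, hpre, hmin⟩ := PySem.Chars.findFrom_natCast_spec cs [c] k hkle hne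
  by_contra hne2
  have hlt : k < (PySem.Chars.findFrom cs [c] (k : Int) none).toNat := by omega
  exact hmin k le_rfl hlt hocc

theorem pvFspec (cs : List Char) (c : Char) (k : Nat) (hk : k ≤ cs.length)
    (h : PySem.Chars.findFrom cs [c] (k : Int) none ≠ -1) :
    (k : Int) ≤ PySem.Chars.findFrom cs [c] (k : Int) none ∧
      (PySem.Chars.findFrom cs [c] (k : Int) none).toNat < cs.length ∧
      cs[(PySem.Chars.findFrom cs [c] (k : Int) none).toNat]? = some c := by
  obtain ⟨hge, hpre, hmin⟩ := PySem.Chars.findFrom_natCast_spec cs [c] k hk h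
  have hc := (pvPrefixDrop c cs _).1 hpre
  exact ⟨hge, (List.getElem?_eq_some_iff.1 hc).1, hc⟩

theorem pvF1 (cs : List Char) (c : Char) (k : Nat) (hk : k < cs.length) (hc : cs[k]? ≠ some c) :
    PySem.Chars.findFrom cs [c] (k : Int) none = PySem.Chars.findFrom cs [c] ((k : Int) + 1) none := by
  have hkle : k ≤ cs.length := le_of_lt hk
  have hk1 : k + 1 ≤ cs.length := hk
  have hcast : ((k : Int) + 1) = ((k + 1 : Nat) : Int) := by push_cast; ring
  rw [hcast]
  by_cases h1 : PySem.Chars.findFrom cs [c] (k : Int) none = -1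
  · by_cases h2 : PySem.Chars.findFrom cs [c] ((k + 1 : Nat) : Int) none = -1
    · rw [h1, h2]
    · exfalso
      obtain ⟨hge, hlt, hcc⟩ := pvFspec cs c (k + 1) hk1 h2
      rw [PySem.Chars.findFrom_natCast_eq_neg_one_iff cs [c] k hkle] at h1
      exact h1 (pvMemDrop cs c k _ (by omega) hcc)
  · obtain ⟨hge, hlt, hcc⟩ := pvFspec cs c k hkle h1
    obtain ⟨hgem, hprem, hminm⟩ := PySem.Chars.findFrom_natCast_spec cs [c] k hkle h1
    have hrk : k + 1 ≤ (PySem.Chars.findFrom cs [c] (k : Int) none).toNat := by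
      rcases Nat.lt_or_ge k (PySem.Chars.findFrom cs [c] (k : Int) none).toNat with h | h
      · omega
      · have hkk : (PySem.Chars.findFrom cs [c] (k : Int) none).toNat = k := by omega
        rw [hkk] at hcc; exact absurd hcc hc
    have h2 : PySem.Chars.findFrom cs [c] ((k + 1 : Nat) : Int) none ≠ -1 := by
      intro h2
      rw [PySem.Chars.findFrom_natCast_eq_neg_one_iff cs [c] (k + 1) hk1] at h2
      exact h2 (pvMemDrop cs c (k + 1) _ hrk hcc)
    obtain ⟨hgem2, hprem2, hminm2⟩ := PySem.Chars.findFrom_natCast_spec cs [c] (k + 1) hk1 h2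
    obtain ⟨hge2, hlt2, hcc2⟩ := pvFspec cs c (k + 1) hk1 h2
    have ha : ¬ (PySem.Chars.findFrom cs [c] (k : Int) none).toNat <
        (PySem.Chars.findFrom cs [c] ((k + 1 : Nat) : Int) none).toNat := fun hlt3 =>
      hminm2 _ hrk hlt3 ((pvPrefixDrop c cs _).2 hcc)
    have hb : ¬ (PySem.Chars.findFrom cs [c] ((k + 1 : Nat) : Int) none).toNat <
        (PySem.Chars.findFrom cs [c] (k : Int) none).toNat := fun hlt3 =>
      hminm _ (by omega) hlt3 ((pvPrefixDrop c cs _).2 hcc2)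
    omega

-- B's loop is unchanged by stepping over an insignificant character
theorem pvBLoop_step (cs : List Char) (endc : Char) (triple : Bool) (closer length : Int) (k : Nat)
    (hk : k < cs.length) (hkl : (k : Int) < length) (_hlen : length ≤ (cs.length : Int))
    (hqc : cs[k]? ≠ some endc) (hbc : cs[k]? ≠ some '\\') :
    pvBLoop cs endc triple closer length (k : Int) = pvBLoop cs endc triple closer length ((k : Int) + 1) := by
  have hl' : ¬ length ≤ (k : Int) := by omega
  have hcast : ((k : Int) + 1) = ((k + 1 : Nat) : Int) := by push_cast; ring
  have hk1 : k + 1 ≤ cs.length := hk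
  have hQ := pvF1 cs endc k hk hqc
  have hB := pvF1 cs '\\' k hk hbc
  rw [pvBLoop, dif_neg hl', hQ, hB]
  by_cases hend : length ≤ (k : Int) + 1
  · have heF : ¬(¬(PySem.Chars.findFrom cs ['\\'] ((k : Int) + 1) none = -1 ∨
        length ≤ PySem.Chars.findFrom cs ['\\'] ((k : Int) + 1) none) ∧
        (PySem.Chars.findFrom cs [endc] ((k : Int) + 1) none = -1 ∨
          length ≤ PySem.Chars.findFrom cs [endc] ((k : Int) + 1) none ∨
          PySem.Chars.findFrom cs ['\\'] ((k : Int) + 1) none <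
            PySem.Chars.findFrom cs [endc] ((k : Int) + 1) none)) := by
      rintro ⟨h1, -⟩
      have h1' : PySem.Chars.findFrom cs ['\\'] ((k + 1 : Nat) : Int) none ≠ -1 := by
        rw [← hcast]; intro hx; exact h1 (Or.inl hx)
      obtain ⟨hge, -, -⟩ := pvFspec cs '\\' (k + 1) hk1 h1'
      rw [← hcast] at hge
      exact h1 (Or.inr (by omega))
    rw [dif_neg heF]
    have hqT : PySem.Chars.findFrom cs [endc] ((k : Int) + 1) none = -1 ∨
        length ≤ PySem.Chars.findFrom cs [endc] ((k : Int) + 1) none := by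
      by_cases hx : PySem.Chars.findFrom cs [endc] ((k : Int) + 1) none = -1
      · exact Or.inl hx
      · right
        have hx' : PySem.Chars.findFrom cs [endc] ((k + 1 : Nat) : Int) none ≠ -1 := by
          rw [← hcast]; exact hx
        obtain ⟨hge, -, -⟩ := pvFspec cs endc (k + 1) hk1 hx'
        rw [← hcast] at hge
        omega
    rw [dif_pos hqT]
    have hlen1 : length = (k : Int) + 1 := by omega
    rw [pvBLoop, dif_pos hend, hlen1]
  · conv_rhs => rw [pvBLoop]
    rw [dif_neg hend]

theorem pvLoop_eq (cs : List Char) (endc : Char) (hne : endc ≠ '\\') (triple : Bool) (closer length : Int) :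
    ∀ (n : Nat) (index : Int), (length - index).toNat ≤ n →
      (length ≤ index ∨ (0 ≤ index ∧ length ≤ (cs.length : Int))) →
      pvALoop cs endc triple closer length index = pvBLoop cs endc triple closer length index := by
  intro n
  induction n with
  | zero =>
    intro index hn hpre
    have hl : length ≤ index := by omega
    rw [pvALoop, pvBLoop, dif_pos hl, dif_pos hl]
  | succ n ih =>
    intro index hn hpre
    by_cases hl : length ≤ index
    · rw [pvALoop, pvBLoop, dif_pos hl, dif_pos hl]
    · have hi0 : 0 ≤ index := by rcases hpre with h | h; exacts [absurd h hl, h.1]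
      have hlen : length ≤ (cs.length : Int) := by rcases hpre with h | h; exacts [absurd h hl, h.2]
      have hik : (index.toNat : Int) = index := Int.toNat_of_nonneg hi0
      rw [← hik] at hl hn ⊢
      set k := index.toNat with hkdef
      have hklen : k < cs.length := by omega
      have hc : cs[k]? = some cs[k] := List.getElem?_eq_getElem hklen
      have hget : (PySem.Chars.pyGet? cs (k : Int)).getD (Char.ofNat 0) = cs[k] := by
        rw [pvGetNat cs k hklen, hc]; rfl
      have hcast1 : ((k : Int) + 1) = ((k + 1 : Nat) : Int) := by push_cast; ring
      have hcast2 : ((k : Int) + 2) = ((k + 2 : Nat) : Int) := by push_cast; ring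
      by_cases hcb : cs[k] = '\\'
      · -- escape character: both loops jump to k + 2
        have hA : pvALoop cs endc triple closer length (k : Int) =
            pvALoop cs endc triple closer length ((k : Int) + 2) := by
          rw [pvALoop, dif_neg hl, hget, if_pos hcb]
        have hE : PySem.Chars.findFrom cs ['\\'] (k : Int) none = (k : Int) :=
          pvF2 cs '\\' k hklen (by rw [hc, hcb])
        have heT : ¬(PySem.Chars.findFrom cs ['\\'] (k : Int) none = -1 ∨
            length ≤ PySem.Chars.findFrom cs ['\\'] (k : Int) none) ∧
            (PySem.Chars.findFrom cs [endc] (k : Int) none = -1 ∨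
              length ≤ PySem.Chars.findFrom cs [endc] (k : Int) none ∨
              PySem.Chars.findFrom cs ['\\'] (k : Int) none <
                PySem.Chars.findFrom cs [endc] (k : Int) none) := by
          refine ⟨by rw [hE]; omega, ?_⟩
          by_cases hx : PySem.Chars.findFrom cs [endc] (k : Int) none = -1
          · exact Or.inl hx
          · obtain ⟨hge, hltl, hcc⟩ := pvFspec cs endc k (le_of_lt hklen) hx
            by_cases hy : length ≤ PySem.Chars.findFrom cs [endc] (k : Int) none
            · exact Or.inr (Or.inl hy)
            · refine Or.inr (Or.inr ?_)
              rw [hE]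
              have hne2 : (PySem.Chars.findFrom cs [endc] (k : Int) none).toNat ≠ k := by
                intro hx2; rw [hx2, hc] at hcc
                simp only [Option.some.injEq] at hcc
                exact hne (hcc ▸ hcb)
              omega
        have hB : pvBLoop cs endc triple closer length (k : Int) =
            pvBLoop cs endc triple closer length ((k : Int) + 2) := by
          rw [pvBLoop, dif_neg hl, dif_pos heT, hE]
        rw [hA, hB]
        exact ih ((k : Int) + 2) (by omega) (by right; constructor <;> omega)
      · by_cases hce : cs[k] = endc
        · -- the end character: both loops act at position k
          have hQ : PySem.Chars.findFrom cs [endc] (k : Int) none = (k : Int) :=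
            pvF2 cs endc k hklen (by rw [hc, hce])
          have heF : ¬(¬(PySem.Chars.findFrom cs ['\\'] (k : Int) none = -1 ∨
              length ≤ PySem.Chars.findFrom cs ['\\'] (k : Int) none) ∧
              (PySem.Chars.findFrom cs [endc] (k : Int) none = -1 ∨
                length ≤ PySem.Chars.findFrom cs [endc] (k : Int) none ∨
                PySem.Chars.findFrom cs ['\\'] (k : Int) none <
                  PySem.Chars.findFrom cs [endc] (k : Int) none)) := by
            rintro ⟨h1, h2⟩
            have h1' : PySem.Chars.findFrom cs ['\\'] (k : Int) none ≠ -1 := fun hx => h1 (Or.inl hx)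
            obtain ⟨hge, -, -⟩ := pvFspec cs '\\' k (le_of_lt hklen) h1'
            rw [hQ] at h2
            rcases h2 with h2 | h2 | h2 <;> omega
          have hqF : ¬(PySem.Chars.findFrom cs [endc] (k : Int) none = -1 ∨
              length ≤ PySem.Chars.findFrom cs [endc] (k : Int) none) := by
            rw [hQ]; omega
          rw [pvALoop, dif_neg hl, hget, if_neg hcb, if_pos hce,
            pvBLoop, dif_neg hl, dif_neg heF, dif_neg hqF, hQ]
          cases triple with
          | false => simp only [Bool.false_eq_true, if_false]
          | true =>
            simp only [if_true]
            by_cases hcond : (k : Int) + 2 < length ∧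
                (PySem.Chars.pyGet? cs ((k : Int) + 1)).getD (Char.ofNat 0) = endc ∧
                (PySem.Chars.pyGet? cs ((k : Int) + 2)).getD (Char.ofNat 0) = endc
            · rw [if_pos hcond, if_pos hcond]
              norm_num
              omega
            · rw [if_neg hcond, if_neg hcond]
              exact ih ((k : Int) + 1) (by omega) (by right; constructor <;> omega)
        · -- an insignificant character: A steps by one, B's state is unchanged by the step
          have hA : pvALoop cs endc triple closer length (k : Int) =
              pvALoop cs endc triple closer length ((k : Int) + 1) := by
            rw [pvALoop, dif_neg hl, hget, if_neg hcb, if_neg hce]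
          rw [hA, ih ((k : Int) + 1) (by omega) (by right; constructor <;> omega),
            ← pvBLoop_step cs endc triple closer length k hklen (by omega) hlen
              (by rw [hc]; exact fun hx => hce (Option.some.injEq _ _ ▸ hx)) 
              (by rw [hc]; exact fun hx => hcb (Option.some.injEq _ _ ▸ hx))]

-- ===== VERDICT (by name: the statement is the Claim_ definition above) =====
theorem parse_forward_next_string_py_spec : Claim_equal_parse_forward_next_string_py := by
  intro line index length source_action _hdom hpre
  unfold Spec_parse_forward_next_string_py
  have hlen : PySem.Str.len line = (line.toList.length : Int) := by simp [pysem]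
  have hpre' : length ≤ index ∨ (0 ≤ index ∧ length ≤ (line.toList.length : Int)) := by
    unfold Pre_parse_forward_next_string_py at hpre; rw [hlen] at hpre; exact hpre
  unfold parse_forward_next_string_py parse_forward_next_string_py_alt
  by_cases h7 : source_action = 7
  · simp only [h7]; norm_num
    exact pvLoop_eq line.toList '\'' (by decide) false 11 length _ index le_rfl hpre'
  · by_cases h8 : source_action = 8
    · simp only [h8]; norm_num
      exact pvLoop_eq line.toList '"' (by decide) false 12 length _ index le_rfl hpre'
    · by_cases h9 : source_action = 9
      · simp only [h9]; norm_num
        exact pvLoop_eq line.toList '\'' (by decide) true 13 length _ index le_rfl hpre'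
      · by_cases h10 : source_action = 10
        · simp only [h10]; norm_num
          exact pvLoop_eq line.toList '"' (by decide) true 14 length _ index le_rfl hpre'
        · simp only [if_neg h7, if_neg h8, if_neg h9, if_neg h10]
          exact pvLoop_eq line.toList '\'' (by decide) false 11 length _ index le_rfl hpre'
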